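-- pv_equiv track=rewrite | github.com/Mark3vich/data_analysis | Regression_Analysis/main_.py | convertColumns
-- ===== SOURCE A (Python) =====
-- def convertColumns(dataset: list) -> list[list]:
--     columns = [[d[i] for d in dataset] for i, _ in enumerate(dataset[0])]
--     new_columns = []
--     vdict = {}
--     for i, col in enumerate(columns):
--         new_columns.append([])
--         vdict[i] = {}
--         for v in col:
--             try:
--                 new_columns[-1].append(int(v))
--             except:
--                 if v not in vdict[i]:
--                     vdict[i][v] = len(vdict[i])
--                 new_columns[-1].append(vdict[i][v])
--     new_data = [[d[i] for d in new_columns] for i, _ in enumerate(new_columns[0])]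
--     return new_data
-- ===== SOURCE B (Python) =====
-- # Row-major single pass: one dict per column maintained while scanning rows once;
-- # no transposes, output rows built directly.
-- def convertColumns(dataset: list) -> list[list]:
--     ncols = len(dataset[0])
--     dicts = [{} for _ in range(ncols)]
--     result = []
--     for row in dataset:
--         new_row = []
--         for c in range(ncols):
--             v = row[c]
--             try:
--                 new_row.append(int(v))
--             except ValueError:
--                 d = dicts[c]
--                 if v not in d:
--                     d[v] = len(d)
--                 new_row.append(d[v])
--         result.append(new_row)
--     return result
-- ===== Notes on version B (the rewrite author's own statement) =====
-- stated objective: simpler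
-- what changed: B drops both transpose passes and the intermediate column-wise structure: it scans the dataset once row by row, keeping one encoding dict per column, and emits each output row directly.
import Mathlib
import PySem

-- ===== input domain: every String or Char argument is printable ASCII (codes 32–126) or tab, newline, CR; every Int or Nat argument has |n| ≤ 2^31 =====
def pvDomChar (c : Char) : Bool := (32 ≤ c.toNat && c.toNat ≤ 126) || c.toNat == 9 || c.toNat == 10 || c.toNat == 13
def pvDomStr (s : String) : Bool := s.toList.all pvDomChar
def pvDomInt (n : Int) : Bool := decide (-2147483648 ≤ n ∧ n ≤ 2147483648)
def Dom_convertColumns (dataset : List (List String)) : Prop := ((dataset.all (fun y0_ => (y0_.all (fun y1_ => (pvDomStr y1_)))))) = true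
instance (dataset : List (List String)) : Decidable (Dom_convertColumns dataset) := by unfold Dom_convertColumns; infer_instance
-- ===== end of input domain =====

-- B replaces A's two transpose passes and intermediate column lists by a single row-major
-- pass keeping one encoding dict per column (objective: simpler; same asymptotic cost).


-- ===== PORT A =====
-- the body of A's inner 'for v in col' loop: try int(v) / except: code v via the dict
def stepA (d : PySem.Dict String Int) (v : String) : PySem.Dict String Int × Int :=
  match PySem.Int.ofStr? v with
  | some n => (d, n)
  | none =>
    let d' := if d.contains v then d else d.insert v (d.size : Int)
    (d', d'.getD v 0)

def encStep (st : PySem.Dict String Int × List Int) (v : String) :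
    PySem.Dict String Int × List Int :=
  let p := stepA st.1 v
  (p.1, st.2 ++ [p.2])

-- 'for v in col: …' with the fresh vdict[i] = {} and the appended new column
def encColA (col : List String) : PySem.Dict String Int × List Int :=
  col.foldl encStep (PySem.Dict.empty, [])

def convertColumns (dataset : List (List String)) : List (List Int) :=
  let ncols := (dataset.headD []).length      -- enumerate(dataset[0]); dataset[0] raising is excluded by Pre_
  let columns := (List.range ncols).map
    (fun (i : Nat) => dataset.map (fun d => (PySem.List.pyGet? d (i : Int)).getD ""))   -- d[i]; raising excluded by Pre_
  let newColumns := columns.foldl (fun acc col => acc ++ [(encColA col).2]) []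
  (List.range (newColumns.headD []).length).map                               -- new_columns[0]; raising excluded by Pre_
    (fun (r : Nat) => newColumns.map (fun col => (PySem.List.pyGet? col (r : Int)).getD 0))

-- ===== PORT B =====
-- B's try/except body coding one value against one column dict
def stepB (d : PySem.Dict String Int) (v : String) : PySem.Dict String Int × Int :=
  match PySem.Int.ofStr? v with
  | some n => (d, n)
  | none =>
    let d' := if d.contains v then d else d.insert v (d.size : Int)
    (d', d'.getD v 0)

-- the body of B's inner 'for c in range(ncols)' loop, updating dicts[c] in place
def innerB (row : List String) (st : List (PySem.Dict String Int) × List Int) (c : Nat) :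
    List (PySem.Dict String Int) × List Int :=
  let v := (PySem.List.pyGet? row (c : Int)).getD ""                          -- row[c]; raising excluded by Pre_
  let d := (PySem.List.pyGet? st.1 (c : Int)).getD PySem.Dict.empty           -- dicts[c], always in range
  let p := stepB d v
  (st.1.set c p.1, st.2 ++ [p.2])

def rowStepB (ncols : Nat) (dicts : List (PySem.Dict String Int)) (row : List String) :
    List (PySem.Dict String Int) × List Int :=
  (List.range ncols).foldl (innerB row) (dicts, [])

def convertColumns_alt (dataset : List (List String)) : List (List Int) :=
  let ncols := (dataset.headD []).length
  let init := (List.range ncols).map (fun _ => (PySem.Dict.empty : PySem.Dict String Int))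
  (dataset.foldl (fun st row =>
    let p := rowStepB ncols st.1 row
    (p.1, st.2 ++ [p.2])) (init, [])).2

-- ===== PRECONDITION & SPEC =====
-- Pre_ excludes exactly the inputs on which the Python A raises IndexError: the empty
-- dataset (dataset[0]), an empty first row (new_columns[0]), and rows shorter than the
-- first row (d[i]).
def Pre_convertColumns (dataset : List (List String)) : Prop :=
  dataset ≠ [] ∧ dataset.headD [] ≠ [] ∧
    ∀ row ∈ dataset, (dataset.headD []).length ≤ row.length
instance (dataset : List (List String)) : Decidable (Pre_convertColumns dataset) := by
  unfold Pre_convertColumns; infer_instance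

def pvWitness_convertColumns : List (List String) := [["1", "a"], ["x", "2"], ["x", "a"]]

def Spec_convertColumns (dataset : List (List String)) (out : List (List Int)) : Prop := out = convertColumns_alt dataset
instance (dataset : List (List String)) (out : List (List Int)) : Decidable (Spec_convertColumns dataset out) := by unfold Spec_convertColumns; infer_instance

-- ===== CLAIM (what is proved, stated in full; the proofs are below) =====
def Claim_equal_convertColumns : Prop := ∀ (dataset : List (List String)), Dom_convertColumns dataset → Pre_convertColumns dataset → Spec_convertColumns dataset (convertColumns dataset)
-- ===== LEMMAS AND PROOFS =====

-- the value Python reads at row `row`, column `c` (total form; in range under Pre_)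
def cellv (row : List String) (c : Nat) : String := (PySem.List.pyGet? row (c : Int)).getD ""

-- column c of a list of rows
def colOf (P : List (List String)) (c : Nat) : List String := P.map (fun row => cellv row c)

lemma stepB_eq_stepA : stepB = stepA := rfl

lemma encColA_acc (ys : List String) (d : PySem.Dict String Int) (acc : List Int) :
    ys.foldl encStep (d, acc)
      = ((ys.foldl encStep (d, [])).1, acc ++ (ys.foldl encStep (d, [])).2) := by
  induction ys generalizing d acc with
  | nil => simp
  | cons y ys ih =>
    simp only [List.foldl_cons]
    rw [show encStep (d, acc) y = ((stepA d y).1, acc ++ [(stepA d y).2]) from rfl,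
        show encStep (d, []) y = ((stepA d y).1, [(stepA d y).2]) from rfl,
        ih _ (acc ++ [(stepA d y).2]), ih _ [(stepA d y).2]]
    simp

lemma encColA_append (xs : List String) (v : String) :
    encColA (xs ++ [v]) =
      ((stepA (encColA xs).1 v).1, (encColA xs).2 ++ [(stepA (encColA xs).1 v).2]) := by
  simp [encColA, List.foldl_append, encStep]

lemma encColA_length (xs : List String) : (encColA xs).2.length = xs.length := by
  induction xs using List.reverseRecOn with
  | nil => simp [encColA]
  | append_singleton xs v ih => rw [encColA_append]; simp [ih]

lemma encColA_split (xs ys : List String) :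
    (encColA (xs ++ ys)).2
      = (encColA xs).2 ++ (ys.foldl encStep ((encColA xs).1, [])).2 := by
  have h1 : encColA (xs ++ ys) = ys.foldl encStep ((encColA xs).1, (encColA xs).2) := by
    rw [encColA, List.foldl_append]; rfl
  rw [h1, encColA_acc]

-- value at position P.length of the encoding of the full column through P ++ r :: L
lemma encColA_getD_mid (P L : List (List String)) (r : List String) (c : Nat) :
    (encColA (colOf (P ++ r :: L) c)).2.getD P.length 0
      = (stepA (encColA (colOf P c)).1 (cellv r c)).2 := by
  have hsplit : colOf (P ++ r :: L) c = (colOf P c ++ [cellv r c]) ++ colOf L c := by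
    simp [colOf]
  have hl : (encColA (colOf P c)).2.length = P.length := by
    rw [encColA_length]; simp [colOf]
  rw [hsplit, encColA_split, encColA_append, List.getD_eq_getElem?_getD,
      List.getElem?_append_left (by simp [hl]),
      List.getElem?_append_right (by omega)]
  simp [hl]

-- one inner B loop, running over the tail `todo` of the dict list
lemma rowStepB_aux (row : List String) (todo done : List (PySem.Dict String Int)) (acc : List Int) :
    (List.range' done.length todo.length).foldl (innerB row) (done ++ todo, acc)
      = (done ++ (todo.zipIdx done.length).map (fun q => (stepA q.1 (cellv row q.2)).1),
         acc ++ (todo.zipIdx done.length).map (fun q => (stepA q.1 (cellv row q.2)).2)) := by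
  induction todo generalizing done acc with
  | nil => simp
  | cons d rest ih =>
    rw [List.length_cons, List.range'_succ, List.foldl_cons]
    have hread : (PySem.List.pyGet? (done ++ d :: rest) ((done.length : Nat) : Int)).getD
        PySem.Dict.empty = d := by
      rw [PySem.List.pyGet?_natCast]
      simp
    have hbody : innerB row (done ++ d :: rest, acc) done.length
        = (done ++ (stepA d (cellv row done.length)).1 :: rest,
           acc ++ [(stepA d (cellv row done.length)).2]) := by
      simp only [innerB, stepB_eq_stepA, cellv, hread]
      congr 1
      simp
    rw [hbody]
    have hdone : done ++ (stepA d (cellv row done.length)).1 :: rest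
        = (done ++ [(stepA d (cellv row done.length)).1]) ++ rest := by simp
    have hlen : done.length + 1 = (done ++ [(stepA d (cellv row done.length)).1]).length := by simp
    rw [hdone, hlen, ih]
    simp [List.zipIdx_cons]

lemma rowStepB_spec (row : List String) (n : Nat) (dicts : List (PySem.Dict String Int))
    (h : dicts.length = n) :
    rowStepB n dicts row
      = ((dicts.zipIdx 0).map (fun q => (stepA q.1 (cellv row q.2)).1),
         (dicts.zipIdx 0).map (fun q => (stepA q.1 (cellv row q.2)).2)) := by
  rw [rowStepB, List.range_eq_range', ← h]
  simpa using rowStepB_aux row dicts [] []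

-- the per-column dict states after the rows of P
def dictsOf (n : Nat) (P : List (List String)) : List (PySem.Dict String Int) :=
  (List.range n).map (fun c => (encColA (colOf P c)).1)

lemma zipIdx_dictsOf (n : Nat) (P : List (List String)) :
    (dictsOf n P).zipIdx 0 = (List.range n).map (fun c => ((encColA (colOf P c)).1, c)) := by
  apply List.ext_getElem <;> simp [dictsOf, List.getElem_zipIdx]

lemma colOf_snoc (P : List (List String)) (r : List String) (c : Nat) :
    colOf (P ++ [r]) c = colOf P c ++ [cellv r c] := by simp [colOf]

-- B's outer loop, from the state reached after the rows of P
lemma outerB (n : Nat) :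
    ∀ (L P : List (List String)) (acc : List (List Int)),
    (L.foldl (fun st row =>
        let p := rowStepB n st.1 row
        (p.1, st.2 ++ [p.2])) (dictsOf n P, acc))
      = (dictsOf n (P ++ L),
         acc ++ (List.range L.length).map (fun r =>
           (List.range n).map (fun c => (encColA (colOf (P ++ L) c)).2.getD (P.length + r) 0))) := by
  intro L
  induction L with
  | nil => intro P acc; simp
  | cons r L ih =>
    intro P acc
    simp only [List.foldl_cons]
    rw [rowStepB_spec r n (dictsOf n P) (by simp [dictsOf]), zipIdx_dictsOf]
    have hd : ((List.range n).map (fun c => ((encColA (colOf P c)).1, c))).map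
        (fun q => (stepA q.1 (cellv r q.2)).1) = dictsOf n (P ++ [r]) := by
      simp [dictsOf, List.map_map, colOf_snoc, encColA_append]
    have hrow : ((List.range n).map (fun c => ((encColA (colOf P c)).1, c))).map
        (fun q => (stepA q.1 (cellv r q.2)).2)
        = (List.range n).map (fun c => (encColA (colOf (P ++ r :: L) c)).2.getD P.length 0) := by
      simp only [List.map_map]
      exact List.map_congr_left (fun c _ => (encColA_getD_mid P L r c).symm)
    rw [hd, hrow, ih (P ++ [r])]
    have hPL : (P ++ [r]) ++ L = P ++ r :: L := by simp
    rw [hPL]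
    refine Prod.ext rfl ?_
    simp only [List.append_assoc]
    congr 1
    rw [List.length_cons, List.range_succ_eq_map, List.map_cons, List.map_map,
        ← List.singleton_append]
    simp only [List.append_nil, List.singleton_append, List.length_append,
      List.length_singleton, Nat.add_zero]
    congr 1
    apply List.map_congr_left
    intro k _
    simp only [Function.comp_apply]
    rw [show P.length + 1 + k = P.length + (k + 1) from by omega]

-- A's foldl building new_columns is the map of per-column encodings
lemma newColumns_eq (cols : List (List String)) :
    cols.foldl (fun acc col => acc ++ [(encColA col).2]) []
      = cols.map (fun col => (encColA col).2) := by
  simpa using PySem.List.foldl_append_singleton_eq_map (fun col => (encColA col).2) cols []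

-- ===== VERDICT (by name: the statement is the Claim_ definition above) =====
theorem convertColumns_spec : Claim_equal_convertColumns := by
  intro dataset _ hpre
  obtain ⟨hne, hhd, -⟩ := hpre
  unfold Spec_convertColumns
  simp only [convertColumns, convertColumns_alt]
  set n := (dataset.headD []).length with hn
  have hnpos : 0 < n := by
    cases dataset with
    | nil => exact absurd rfl hne
    | cons r rest => simpa [hn] using List.length_pos_of_ne_nil (by simpa using hhd)
  -- B side
  have hinit : (List.range n).map (fun _ => (PySem.Dict.empty : PySem.Dict String Int))
      = dictsOf n [] := by simp [dictsOf, colOf, encColA]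
  rw [hinit]
  have hB := outerB n dataset [] []
  simp only [List.nil_append, List.length_nil, Nat.zero_add] at hB
  rw [hB]
  -- A side
  rw [newColumns_eq]
  simp only [List.map_map]
  have hcols : (List.range n).map
      ((fun col => (encColA col).2) ∘ fun (i : Nat) => dataset.map
        (fun d => (PySem.List.pyGet? d (i : Int)).getD ""))
      = (List.range n).map (fun c => (encColA (colOf dataset c)).2) := by
    simp [colOf, cellv]
  rw [hcols]
  have hhead : ((List.range n).map (fun c => (encColA (colOf dataset c)).2)).headD []
      = (encColA (colOf dataset 0)).2 := by
    obtain ⟨m, hm⟩ : ∃ m, n = m + 1 := ⟨n - 1, by omega⟩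
    rw [hm, List.range_succ_eq_map]
    simp
  rw [hhead]
  have hlenc : (encColA (colOf dataset 0)).2.length = dataset.length := by
    rw [encColA_length]; simp [colOf]
  rw [hlenc]
  apply List.map_congr_left
  intro r hr
  apply List.map_congr_left
  intro c _
  simp only [Function.comp_apply]
  rw [PySem.List.pyGet?_natCast, ← List.getD_eq_getElem?_getD]
  rfl
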